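-- pv_equiv track=rewrite | github.com/vajwanigithud/DocSort | docsort/app/services/split_plan_service.py | validate_groups
-- ===== SOURCE A (Python) =====
-- from typing import List, Tuple
--
-- def validate_groups(total_pages: int, groups: List[Tuple[int, int]]) -> Tuple[bool, str]:
--     if any(start < 1 or end < start or end > total_pages for start, end in groups):
--         return False, "Groups out of bounds or invalid."
--     sorted_groups = sorted(groups, key=lambda g: g[0])
--     for idx in range(1, len(sorted_groups)):
--         prev = sorted_groups[idx - 1]
--         cur = sorted_groups[idx]
--         if cur[0] <= prev[1]:
--             return False, "Groups overlap or are not strictly ascending."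
--     return True, ""
-- ===== SOURCE B (Python) =====
-- from typing import List, Tuple
--
-- def validate_groups(total_pages: int, groups: List[Tuple[int, int]]) -> Tuple[bool, str]:
--     if any(start < 1 or end < start or end > total_pages for start, end in groups):
--         return False, "Groups out of bounds or invalid."
--     seen = []
--     for start, end in groups:
--         if any(s <= end and start <= e for s, e in seen):
--             return False, "Groups overlap or are not strictly ascending."
--         seen.append((start, end))
--     return True, ""
-- ===== Notes on version B (the rewrite author's own statement) =====
-- stated objective: alternative
-- what changed: Replaces sort-then-adjacent-scan overlap detection with a no-sort incremental pairwise check: each group is tested for intersection against the groups already seen.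
import Mathlib
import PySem

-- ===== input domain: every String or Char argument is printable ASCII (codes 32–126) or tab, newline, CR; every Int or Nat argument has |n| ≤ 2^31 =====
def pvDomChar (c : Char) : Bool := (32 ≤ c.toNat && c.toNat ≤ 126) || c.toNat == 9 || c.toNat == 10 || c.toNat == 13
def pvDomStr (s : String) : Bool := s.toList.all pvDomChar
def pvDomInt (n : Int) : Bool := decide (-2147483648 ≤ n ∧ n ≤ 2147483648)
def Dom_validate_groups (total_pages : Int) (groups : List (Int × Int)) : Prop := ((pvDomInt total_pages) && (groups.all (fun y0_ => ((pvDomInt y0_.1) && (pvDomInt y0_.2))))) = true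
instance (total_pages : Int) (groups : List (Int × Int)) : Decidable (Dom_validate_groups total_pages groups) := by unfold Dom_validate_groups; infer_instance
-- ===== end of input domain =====

-- B replaces A's sort-then-adjacent-scan overlap check by a no-sort incremental pairwise
-- intersection check against the groups already seen (alternative decomposition, same values).

-- ===== PORT A =====
-- A's for-loop over idx in range(1, len) compares each adjacent pair (sorted[idx-1], sorted[idx]);
-- ported as structural recursion over the same adjacent pairs, in the same order.
def vgALoop : List (Int × Int) → Bool × String
  | a :: b :: rest =>
    if b.1 ≤ a.2 then (false, "Groups overlap or are not strictly ascending.")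
    else vgALoop (b :: rest)
  | _ => (true, "")

def validate_groups (total_pages : Int) (groups : List (Int × Int)) : Bool × String :=
  if groups.any (fun g => decide (g.1 < 1) || decide (g.2 < g.1) || decide (total_pages < g.2)) then
    (false, "Groups out of bounds or invalid.")
  else
    vgALoop (PySem.List.sorted groups (fun g => g.1) false)

-- ===== PORT B =====
-- B's loop over groups with the accumulator `seen`; the inner `any(...)` over seen is List.any.
def vgBLoop (seen : List (Int × Int)) : List (Int × Int) → Bool × String
  | [] => (true, "")
  | g :: rest =>
    if seen.any (fun p => decide (p.1 ≤ g.2) && decide (g.1 ≤ p.2)) then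
      (false, "Groups overlap or are not strictly ascending.")
    else vgBLoop (seen ++ [g]) rest

def validate_groups_alt (total_pages : Int) (groups : List (Int × Int)) : Bool × String :=
  if groups.any (fun g => decide (g.1 < 1) || decide (g.2 < g.1) || decide (total_pages < g.2)) then
    (false, "Groups out of bounds or invalid.")
  else
    vgBLoop [] groups

-- ===== PRECONDITION & SPEC =====
def Spec_validate_groups (total_pages : Int) (groups : List (Int × Int)) (out : Bool × String) : Prop := out = validate_groups_alt total_pages groups
instance (total_pages : Int) (groups : List (Int × Int)) (out : Bool × String) : Decidable (Spec_validate_groups total_pages groups out) := by unfold Spec_validate_groups; infer_instance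

-- ===== CLAIM (what is proved, stated in full; the proofs are below) =====
def Claim_equal_validate_groups : Prop := ∀ (total_pages : Int) (groups : List (Int × Int)), Dom_validate_groups total_pages groups → Spec_validate_groups total_pages groups (validate_groups total_pages groups)

-- ===== LEMMAS AND PROOFS =====

def vgDisj (p g : Int × Int) : Prop := ¬(p.1 ≤ g.2 ∧ g.1 ≤ p.2)

theorem vgBLoop_true_iff (seen rest : List (Int × Int)) :
    vgBLoop seen rest = (true, "") ↔
      ((∀ p ∈ seen, ∀ g ∈ rest, vgDisj p g) ∧ rest.Pairwise vgDisj) := by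
  induction rest generalizing seen with
  | nil => simp [vgBLoop]
  | cons g rest ih =>
    by_cases h : seen.any (fun p => decide (p.1 ≤ g.2) && decide (g.1 ≤ p.2)) = true
    · rw [show vgBLoop seen (g :: rest) =
          (false, "Groups overlap or are not strictly ascending.") from by
        simp [vgBLoop, h]]
      simp only [List.any_eq_true, Bool.and_eq_true, decide_eq_true_eq] at h
      obtain ⟨p, hp, h1, h2⟩ := h
      constructor
      · intro hx; simp at hx
      · rintro ⟨hcross, _⟩
        exact ((hcross p hp g (List.mem_cons_self)) ⟨h1, h2⟩).elim
    · rw [show vgBLoop seen (g :: rest) = vgBLoop (seen ++ [g]) rest from by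
        simp [vgBLoop, h]]
      rw [ih]
      simp only [List.any_eq_true, Bool.and_eq_true, decide_eq_true_eq, not_exists, not_and] at h
      constructor
      · rintro ⟨hcross, hpw⟩
        refine ⟨?_, ?_⟩
        · intro p hp g' hg'
          rcases List.mem_cons.mp hg' with rfl | hg'
          · intro hc
            exact h p hp hc.1 hc.2
          · exact hcross p (List.mem_append_left _ hp) g' hg'
        · exact List.Pairwise.cons
            (fun g' hg' => hcross g (List.mem_append_right _ (by simp)) g' hg') hpw
      · rintro ⟨hcross, hpw⟩
        rcases List.pairwise_cons.mp hpw with ⟨hhead, htail⟩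
        refine ⟨?_, htail⟩
        intro p hp g' hg'
        rcases List.mem_append.mp hp with hp | hp
        · exact hcross p hp g' (List.mem_cons_of_mem _ hg')
        · have hpg : p = g := by simpa using hp
          subst hpg; exact hhead g' hg'

theorem vgBLoop_dichotomy (seen rest : List (Int × Int)) :
    vgBLoop seen rest = (true, "") ∨
      vgBLoop seen rest = (false, "Groups overlap or are not strictly ascending.") := by
  induction rest generalizing seen with
  | nil => left; rfl
  | cons g rest ih =>
    by_cases h : seen.any (fun p => decide (p.1 ≤ g.2) && decide (g.1 ≤ p.2)) = true
    · right; simp [vgBLoop, h]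
    · rw [show vgBLoop seen (g :: rest) = vgBLoop (seen ++ [g]) rest from by
        simp [vgBLoop, h]]
      exact ih _

theorem vgALoop_true_iff (l : List (Int × Int)) :
    vgALoop l = (true, "") ↔ l.IsChain (fun a b => a.2 < b.1) := by
  induction l with
  | nil => simp [vgALoop]
  | cons a t ih =>
    cases t with
    | nil => simp [vgALoop]
    | cons b rest =>
      rw [List.isChain_cons_cons]
      by_cases h : b.1 ≤ a.2
      · simp [vgALoop, h, show ¬ a.2 < b.1 by omega]
      · rw [show vgALoop (a :: b :: rest) = vgALoop (b :: rest) from by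
          simp [vgALoop, h]]
        rw [ih]
        simp [show a.2 < b.1 by omega]

theorem vgALoop_dichotomy (l : List (Int × Int)) :
    vgALoop l = (true, "") ∨
      vgALoop l = (false, "Groups overlap or are not strictly ascending.") := by
  induction l with
  | nil => left; rfl
  | cons a t ih =>
    cases t with
    | nil => left; rfl
    | cons b rest =>
      by_cases h : b.1 ≤ a.2
      · right; simp [vgALoop, h]
      · rw [show vgALoop (a :: b :: rest) = vgALoop (b :: rest) from by
          simp [vgALoop, h]]
        exact ih

theorem vgDisj_symm : Symmetric vgDisj := by
  intro a b h hc
  exact h ⟨hc.2, hc.1⟩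

theorem vg_pairwise_of_chain (l : List (Int × Int))
    (hs : l.Pairwise (fun a b => a.1 ≤ b.1))
    (hc : l.IsChain (fun a b => a.2 < b.1)) :
    l.Pairwise (fun a b => a.2 < b.1) := by
  induction l with
  | nil => exact List.Pairwise.nil
  | cons a t ih =>
    rcases List.pairwise_cons.mp hs with ⟨_, hstail⟩
    cases t with
    | nil => simp
    | cons c l' =>
      rcases List.isChain_cons_cons.mp hc with ⟨hac, hct⟩
      refine List.Pairwise.cons ?_ (ih hstail hct)
      intro b hb
      rcases List.mem_cons.mp hb with rfl | hb
      · exact hac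
      · have hcb : c.1 ≤ b.1 := (List.pairwise_cons.mp hstail).1 b hb
        omega

theorem vg_chain_of_pairwise_disj (l : List (Int × Int))
    (hs : l.Pairwise (fun a b => a.1 ≤ b.1))
    (hv : ∀ g ∈ l, g.1 ≤ g.2)
    (hp : l.Pairwise vgDisj) :
    l.IsChain (fun a b => a.2 < b.1) := by
  refine List.Pairwise.isChain ?_
  refine (hs.and hp).imp_of_mem ?_
  intro a b ha hb hab
  have hvb := hv b hb
  by_contra hlt
  exact hab.2 ⟨by omega, by omega⟩

-- ===== VERDICT (by name: the statement is the Claim_ definition above) =====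
theorem validate_groups_spec : Claim_equal_validate_groups := by
  intro total_pages groups _hdom
  unfold Spec_validate_groups validate_groups validate_groups_alt
  by_cases h : groups.any
      (fun g => decide (g.1 < 1) || decide (g.2 < g.1) || decide (g.2 > total_pages)) = true
  · rw [if_pos h, if_pos h]
  · rw [if_neg h, if_neg h]
    rw [Bool.not_eq_true] at h
    simp only [List.any_eq_false, Bool.or_eq_true, decide_eq_true_eq, not_or] at h
    have hv : ∀ g ∈ groups, g.1 ≤ g.2 := by
      intro g hg; have hh := h g hg; omega
    set s := PySem.List.sorted groups (fun g => g.1) false with hsdef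
    have hperm : s.Perm groups := PySem.List.sorted_perm ..
    have hsorted : s.Pairwise (fun a b : Int × Int => a.1 ≤ b.1) :=
      PySem.List.sorted_pairwise ..
    have hiff : vgALoop s = (true, "") ↔ vgBLoop [] groups = (true, "") := by
      rw [vgALoop_true_iff, vgBLoop_true_iff]
      simp only [List.not_mem_nil, false_implies, implies_true, true_and]
      constructor
      · intro hc
        have hps := (vg_pairwise_of_chain s hsorted hc).imp
          (fun {a b} hab => (by intro hc'; omega : vgDisj a b))
        exact (hperm.pairwise_iff (fun {a b} hab => vgDisj_symm hab)).mp hps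
      · intro hpg
        have hps := (hperm.pairwise_iff (fun {a b} hab => vgDisj_symm hab)).mpr hpg
        exact vg_chain_of_pairwise_disj s hsorted
          (fun g hg => hv g (hperm.mem_iff.mp hg)) hps
    rcases vgALoop_dichotomy s with ha | ha <;> rcases vgBLoop_dichotomy [] groups with hb | hb
    · rw [ha, hb]
    · exact absurd (hiff.mp ha) (by rw [hb]; simp)
    · exact absurd (hiff.mpr hb) (by rw [ha]; simp)
    · rw [ha, hb]
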